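-- pv_equiv track=rewrite | github.com/limachara/EGE_2024 | task5CC2816/5CCr-5.py | f
-- ===== SOURCE A (Python) =====
-- def n_to_p(n, p):
--     t = ''
--     a = '0123456789abcdefghijklmnopqrstuwxyz'
--     while n:
--         t = a[n % p] + t
--         n = n // p
--     return t
--
-- def f(n):
--     s = n_to_p(n, 20)
--     t = ''
--     for el in s:
--         if el != 'j':
--             t = t + n_to_p(int(el, 20) + 1, 20)
--         else:
--             t = t + 'j'
--     return int(t, 20)
-- ===== SOURCE B (Python) =====
-- def f(n):
--     digits = []
--     while n:
--         digits.append(n % 20)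
--         n //= 20
--     r = 0
--     for d in reversed(digits):
--         r = r * 20 + (d + 1 if d != 19 else 19)
--     return r
-- ===== Notes on version B (the rewrite author's own statement) =====
-- stated objective: simpler
-- what changed: B works purely numerically: it extracts base-20 digits with a divmod loop and rebuilds the result with a Horner accumulation over the mapped digits, replacing A's string round-trips (encode to a base-20 string, per-character decode/re-encode, final string-to-int parse).
-- crash fix: On n = 0 A raises ValueError (int of an empty string); B returns 0, the natural value of an empty digit list. — e.g. on f(0): A raises ValueError, B returns 0
import Mathlib
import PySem

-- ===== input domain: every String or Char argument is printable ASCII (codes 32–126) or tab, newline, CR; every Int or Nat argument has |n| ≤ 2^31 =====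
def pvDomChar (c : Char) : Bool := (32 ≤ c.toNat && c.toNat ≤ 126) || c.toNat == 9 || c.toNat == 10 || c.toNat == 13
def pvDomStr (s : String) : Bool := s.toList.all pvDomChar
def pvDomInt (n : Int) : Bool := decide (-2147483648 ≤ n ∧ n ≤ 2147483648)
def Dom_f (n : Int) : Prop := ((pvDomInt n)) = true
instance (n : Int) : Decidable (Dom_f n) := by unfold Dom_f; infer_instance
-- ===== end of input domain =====

-- B replaces A's string round-trips (base-20 encode, per-char decode/re-encode, final parse)
-- by a purely numeric divmod digit loop plus a Horner rebuild (objective: simpler).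


-- ===== PORT A =====
-- Python strings are ported as List Char.
-- a = '0123456789abcdefghijklmnopqrstuwxyz'  (exactly as written in the source: 'v' is missing)
def alphaA : List Char := "0123456789abcdefghijklmnopqrstuwxyz".toList

-- while n: t = a[n % p] + t; n = n // p
-- Fuel makes the loop total; n.toNat + 1 steps always suffice (n strictly decreases while positive).
-- The Python loop diverges for n < 0 (and for p ≤ 1); the port stops there (outside Pre_f).
def nToPAux : Nat → Int → Int → List Char
  | 0, _, _ => []
  | fuel + 1, n, p =>
      if 0 < n ∧ 2 ≤ p then
        nToPAux fuel (PySem.Int.floordiv n p) p ++ [PySem.List.pyGetD alphaA (PySem.Int.mod n p) ' ']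
      else []

def n_to_p (n p : Int) : List Char := nToPAux (n.toNat + 1) n p

-- int(c, 20) for a single character: exact on the digit characters '0'-'9','a'-'j' that
-- n_to_p produces under Pre_f (elsewhere Python raises ValueError; those inputs never occur).
def charVal (c : Char) : Int :=
  if '0' ≤ c ∧ c ≤ '9' then (c.toNat : Int) - 48
  else if 'a' ≤ c ∧ c ≤ 'z' then (c.toNat : Int) - 87
  else 0

-- int(t, 20): exact on nonempty strings of base-20 digit characters (the only strings it
-- receives under Pre_f; Python raises ValueError on '').
def parse20 (t : List Char) : Int := t.foldl (fun r c => r * 20 + charVal c) 0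

def f (n : Int) : Int :=
  parse20 ((n_to_p n 20).foldl
    (fun t el => if el ≠ 'j' then t ++ n_to_p (charVal el + 1) 20 else t ++ ['j'])
    ([] : List Char))

-- ===== PORT B =====
-- while n: digits.append(n % 20); n //= 20
-- (fuel as above; the Python loop diverges for n < 0, outside Pre_f, where the port stops)
def fAltDigitsAux : Nat → Int → List Int
  | 0, _ => []
  | fuel + 1, n =>
      if 0 < n then PySem.Int.mod n 20 :: fAltDigitsAux fuel (PySem.Int.floordiv n 20) else []

def fAltDigits (n : Int) : List Int := fAltDigitsAux (n.toNat + 1) n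

def f_alt (n : Int) : Int :=
  (fAltDigits n).reverse.foldl (fun r d => r * 20 + (if d ≠ 19 then d + 1 else 19)) 0

-- ===== PRECONDITION & SPEC =====
-- Pre_f excludes n = 0, where A raises ValueError (int('',20)), and n < 0, where A's while loop
-- never terminates.
def Pre_f (n : Int) : Prop := 1 ≤ n
instance (n : Int) : Decidable (Pre_f n) := by unfold Pre_f; infer_instance
def pvWitness_f : Int := 23

-- On n = 0 A raises ValueError (int('',20)); B returns 0, the natural value of an empty digit list.
def Raises_f (n : Int) : Prop := n = 0
instance (n : Int) : Decidable (Raises_f n) := by unfold Raises_f; infer_instance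
def pvRaiseWitness_f : Int := 0
def pvRaiseWitnessOut_f : Int := 0

def Spec_f (n : Int) (out : Int) : Prop := out = f_alt n
instance (n : Int) (out : Int) : Decidable (Spec_f n out) := by unfold Spec_f; infer_instance

-- ===== CLAIM (what is proved, stated in full; the proofs are below) =====
def Claim_equal_f : Prop := ∀ (n : Int), Dom_f n → Pre_f n → Spec_f n (f n)
def Claim_raises_f : Prop := (∀ (n : Int), Dom_f n → Raises_f n → ¬ Pre_f n) ∧ (Dom_f (pvRaiseWitness_f) ∧ Raises_f (pvRaiseWitness_f) ∧ f_alt (pvRaiseWitness_f) = pvRaiseWitnessOut_f)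

-- ===== LEMMAS AND PROOFS =====

lemma ediv20_lt (n : Int) (h : 0 < n) : n / 20 < n := by
  have hle := Int.ediv_le_self 20 (le_of_lt h)
  rcases eq_or_lt_of_le hle with he | hl
  · exfalso
    have h2 : n / 20 * 20 ≤ n := Int.ediv_mul_le n (by norm_num)
    omega
  · exact hl

-- fuel irrelevance: any fuel above n.toNat gives the same list
lemma nToPAux_fuel (k₁ : Nat) : ∀ (k₂ : Nat) (n p : Int), n.toNat < k₁ → n.toNat < k₂ →
    nToPAux k₁ n p = nToPAux k₂ n p := by
  induction k₁ with
  | zero => intro k₂ n p h1 _; omega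
  | succ k ih =>
      intro k₂ n p h1 h2
      cases k₂ with
      | zero => omega
      | succ k₂' =>
          simp only [nToPAux]
          by_cases hc : 0 < n ∧ 2 ≤ p
          · have hd : PySem.Int.floordiv n p = n / p :=
              PySem.Int.floordiv_eq_ediv_of_pos (by omega)
            have hlt : n / p < n := by
              have := Int.ediv_le_self p (le_of_lt hc.1)
              rcases eq_or_lt_of_le this with he | hl
              · exfalso
                have h2 : n / p * p ≤ n := Int.ediv_mul_le n (by omega)
                have h3 : 0 < n / p → n / p * 2 ≤ n / p * p :=
                  fun hp => by nlinarith [hc.2]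
                omega
              · exact hl
            have hnn : 0 ≤ n / p := Int.ediv_nonneg (le_of_lt hc.1) (by omega)
            rw [if_pos hc, if_pos hc, hd, ih k₂' (n / p) p (by omega) (by omega)]
          · rw [if_neg hc, if_neg hc]

lemma fAltDigitsAux_fuel (k₁ : Nat) : ∀ (k₂ : Nat) (n : Int), n.toNat < k₁ → n.toNat < k₂ →
    fAltDigitsAux k₁ n = fAltDigitsAux k₂ n := by
  induction k₁ with
  | zero => intro k₂ n h1 _; omega
  | succ k ih =>
      intro k₂ n h1 h2
      cases k₂ with
      | zero => omega
      | succ k₂' =>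
          simp only [fAltDigitsAux]
          by_cases hc : 0 < n
          · have hd : PySem.Int.floordiv n 20 = n / 20 :=
              PySem.Int.floordiv_eq_ediv_of_pos (by omega)
            have hlt : n / 20 < n := ediv20_lt n hc
            have hnn : 0 ≤ n / 20 := Int.ediv_nonneg (le_of_lt hc) (by omega)
            rw [if_pos hc, if_pos hc, hd, ih k₂' (n / 20) (by omega) (by omega)]
          · rw [if_neg hc, if_neg hc]

-- the one-step recurrences of the two loops
lemma n_to_p_step (n : Int) (h : 0 < n) :
    n_to_p n 20 = n_to_p (n / 20) 20 ++ [PySem.List.pyGetD alphaA (n % 20) ' '] := by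
  have hd : PySem.Int.floordiv n 20 = n / 20 := PySem.Int.floordiv_eq_ediv_of_pos (by omega)
  have hm : PySem.Int.mod n 20 = n % 20 := PySem.Int.mod_eq_emod_of_pos (by omega)
  have hlt : n / 20 < n := ediv20_lt n h
  have hnn : 0 ≤ n / 20 := Int.ediv_nonneg (le_of_lt h) (by omega)
  show nToPAux (n.toNat + 1) n 20 = _
  rw [nToPAux, if_pos ⟨h, by norm_num⟩, hd, hm,
    nToPAux_fuel n.toNat ((n / 20).toNat + 1) (n / 20) 20 (by omega) (by omega)]
  rfl

lemma fAltDigits_step (n : Int) (h : 0 < n) :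
    fAltDigits n = n % 20 :: fAltDigits (n / 20) := by
  have hd : PySem.Int.floordiv n 20 = n / 20 := PySem.Int.floordiv_eq_ediv_of_pos (by omega)
  have hm : PySem.Int.mod n 20 = n % 20 := PySem.Int.mod_eq_emod_of_pos (by omega)
  have hlt : n / 20 < n := ediv20_lt n h
  have hnn : 0 ≤ n / 20 := Int.ediv_nonneg (le_of_lt h) (by omega)
  show fAltDigitsAux (n.toNat + 1) n = _
  rw [fAltDigitsAux, if_pos h, hd, hm,
    fAltDigitsAux_fuel n.toNat ((n / 20).toNat + 1) (n / 20) (by omega) (by omega)]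
  rfl

-- the digit-mapping A applies: d+1 except that 19 ('j') stays 19
def dmap (d : Int) : Int := if d ≠ 19 then d + 1 else 19

-- the per-character transformation inside A's for-loop, as a function of one character
def gchar (el : Char) : List Char :=
  if el ≠ 'j' then n_to_p (charVal el + 1) 20 else ['j']

lemma trans_eq_flatMap (s : List Char) (acc : List Char) :
    s.foldl (fun t el => if el ≠ 'j' then t ++ n_to_p (charVal el + 1) 20 else t ++ ['j']) acc
      = acc ++ s.flatMap gchar := by
  induction s generalizing acc with
  | nil => simp
  | cons c cs ih =>
      simp only [List.foldl_cons, List.flatMap_cons, ih, gchar]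
      split_ifs <;> simp

lemma parse20_shift (l : List Char) (a : Int) :
    l.foldl (fun r c => r * 20 + charVal c) a = a * 20 ^ l.length + parse20 l := by
  induction l generalizing a with
  | nil => simp [parse20]
  | cons c cs ih =>
      simp only [List.foldl_cons, List.length_cons]
      rw [ih (a * 20 + charVal c), show parse20 (c :: cs) = (c :: cs).foldl (fun r c => r * 20 + charVal c) 0 from rfl,
        List.foldl_cons, ih (0 * 20 + charVal c)]
      ring

lemma parse20_append (x y : List Char) :
    parse20 (x ++ y) = parse20 x * 20 ^ y.length + parse20 y := by
  show (x ++ y).foldl _ 0 = _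
  rw [List.foldl_append, parse20_shift]
  rfl

-- for each base-20 digit d, the transformed chunk of A is one char and parses to dmap d
lemma digit_chunk (d : Int) (h0 : 0 ≤ d) (h1 : d < 20) :
    (gchar (PySem.List.pyGetD alphaA d ' ')).length = 1 ∧
    parse20 (gchar (PySem.List.pyGetD alphaA d ' ')) = dmap d := by
  interval_cases d <;> exact ⟨by decide, by decide⟩

lemma f_alt_rec (n : Int) (h : 0 < n) :
    f_alt n = f_alt (n / 20) * 20 + dmap (n % 20) := by
  unfold f_alt
  rw [fAltDigits_step n h, List.reverse_cons, List.foldl_append]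
  simp [dmap]

lemma main (k : Nat) : ∀ n : Int, 0 ≤ n → n.toNat ≤ k →
    parse20 ((n_to_p n 20).flatMap gchar) = f_alt n := by
  induction k with
  | zero =>
      intro n h0 hk
      have hn : n = 0 := by omega
      subst hn
      decide
  | succ k ih =>
      intro n h0 hk
      rcases eq_or_lt_of_le h0 with h | hpos
      · rw [← h]; decide
      · have hq0 : 0 ≤ n / 20 := Int.ediv_nonneg (by omega) (by omega)
        have hqlt : n / 20 < n := ediv20_lt n hpos
        have hr0 : 0 ≤ n % 20 := Int.emod_nonneg n (by omega)
        have hr1 : n % 20 < 20 := Int.emod_lt_of_pos n (by omega)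
        obtain ⟨hlen, hval⟩ := digit_chunk (n % 20) hr0 hr1
        rw [n_to_p_step n hpos, List.flatMap_append, parse20_append]
        simp only [List.flatMap_cons, List.flatMap_nil, List.append_nil] at *
        rw [hlen, hval, ih (n / 20) hq0 (by omega), f_alt_rec n hpos]
        ring

-- ===== VERDICT (by name: the statement is the Claim_ definition above) =====
theorem f_spec : Claim_equal_f := by
  intro n _ hpre
  have h1 : (1 : Int) ≤ n := hpre
  unfold Spec_f f
  rw [trans_eq_flatMap]
  simpa using main n.toNat n (by omega) (le_refl _)

@[simp] theorem f_raises : Claim_raises_f := by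
  unfold Claim_raises_f
  exact ⟨fun n _ h => by simp [Raises_f] at h; simp [h, Pre_f], by decide⟩
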